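-- pv_equiv track=rewrite | github.com/liuwy0915/MarkovTextGeneration | mtg.py | ngram_freq
-- ===== SOURCE A (Python) =====
-- def ngram_freq(n, token):
--     """
--     save the frequency of n-gram's for each prefix in a dictionary
--     """
--
--     ngram_list = [[token[i+j] for j in range(n)] for i in range(len(token) - n + 1)]
--
--     freq_dict = {}
--
--     for word in ngram_list:
--         if tuple(word[0:n-1]) not in freq_dict.keys():
--             freq_dict.update({tuple(word[0:n-1]): {word[n-1]: 1}})
--         else:
--             if word[n-1] not in freq_dict[tuple(word[0:n-1])].keys():
--                 freq_dict[tuple(word[0:n-1])].update({word[n-1]:1})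
--             else:
--                 freq_dict[tuple(word[0:n-1])][word[n-1]] += 1
--
--
--     return freq_dict
-- ===== SOURCE B (Python) =====
-- def _tally(words):
--     counts = {}
--     for w in words:
--         counts[w] = counts.get(w, 0) + 1
--     return counts
--
--
-- def ngram_freq(n, token):
--     """
--     save the frequency of n-gram's for each prefix in a dictionary
--     """
--     # first pass: group each continuation word under its (n-1)-gram prefix
--     groups = {}
--     for i in range(len(token) - n + 1):
--         groups.setdefault(tuple(token[i:i + n - 1]), []).append(token[i + n - 1])
--     # second pass: tally each prefix's continuation list into a frequency dict
--     return {prefix: _tally(conts) for prefix, conts in groups.items()}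
-- ===== Notes on version B (the rewrite author's own statement) =====
-- stated objective: alternative
-- what changed: B replaces A's inline three-way branching on nested dict membership with a two-pass group-then-count decomposition: first pass groups continuations per prefix with setdefault, second pass tallies each group into a frequency dict.
import Mathlib
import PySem

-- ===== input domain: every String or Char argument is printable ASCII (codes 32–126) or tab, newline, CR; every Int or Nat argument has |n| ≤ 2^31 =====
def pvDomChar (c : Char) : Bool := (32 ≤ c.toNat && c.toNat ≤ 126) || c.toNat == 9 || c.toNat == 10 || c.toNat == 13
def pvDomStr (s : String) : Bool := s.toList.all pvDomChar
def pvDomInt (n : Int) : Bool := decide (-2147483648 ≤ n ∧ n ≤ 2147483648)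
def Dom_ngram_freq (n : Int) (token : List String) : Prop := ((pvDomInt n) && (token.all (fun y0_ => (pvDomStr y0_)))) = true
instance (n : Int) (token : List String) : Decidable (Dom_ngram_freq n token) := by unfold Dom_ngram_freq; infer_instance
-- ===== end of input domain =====

-- B replaces A's inline nested-dict counting with a group-then-count two-pass decomposition (objective: alternative).

-- ===== PORT A =====
-- literal port of A: build ngram_list by comprehension, then one loop that branches on
-- membership of the prefix key and of the continuation key, incrementing inline.
def ngram_freq (n : Int) (token : List String) : List (List String × List (String × Int)) :=
  let ngram_list : List (List String) :=
    (PySem.List.pyRange 0 ((token.length : Int) - n + 1) 1).map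
      (fun i => (PySem.List.pyRange 0 n 1).map (fun j => PySem.List.pyGetD token (i + j) ""))
  let freq_dict : PySem.Dict (List String) (PySem.Dict String Int) :=
    ngram_list.foldl
      (fun fd word =>
        let pfx := PySem.List.slice word (some 0) (some (n - 1))
        if fd.contains pfx = false then
          fd.insert pfx (PySem.Dict.empty.insert (PySem.List.pyGetD word (n - 1) "") 1)
        else
          let inner := fd.getD pfx PySem.Dict.empty
          if inner.contains (PySem.List.pyGetD word (n - 1) "") = false then
            fd.insert pfx (inner.insert (PySem.List.pyGetD word (n - 1) "") 1)
          else
            fd.insert pfx (inner.insert (PySem.List.pyGetD word (n - 1) "")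
              (inner.getD (PySem.List.pyGetD word (n - 1) "") 0 + 1)))
      PySem.Dict.empty
  -- dict-of-dicts rendered as assoc list of assoc lists (type convention)
  freq_dict.items.map (fun p => (p.1, p.2.items))

-- ===== PORT B =====
-- literal port of Source B's _tally helper (plain dict built by get-then-increment)
def pvTally (words : List String) : PySem.Dict String Int :=
  words.foldl (fun counts w => counts.insert w (counts.getD w 0 + 1)) PySem.Dict.empty

-- literal port of B: pass 1 groups continuations per prefix (setdefault+append = append to
-- the current list at the key); pass 2 is the dict comprehension tallying each group
-- (its keys come from a dict, hence are distinct, so the comprehension is a map).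
def ngram_freq_alt (n : Int) (token : List String) : List (List String × List (String × Int)) :=
  let groups : PySem.Dict (List String) (List String) :=
    (PySem.List.pyRange 0 ((token.length : Int) - n + 1) 1).foldl
      (fun g i =>
        g.modify (PySem.List.slice token (some i) (some (i + n - 1))) []
          (fun cs => cs ++ [PySem.List.pyGetD token (i + n - 1) ""]))
      PySem.Dict.empty
  groups.items.map (fun pr => (pr.1, (pvTally pr.2).items))

-- ===== PRECONDITION & SPEC =====
-- Pre_ excludes exactly n ≤ 0, where Python A raises IndexError (word[n-1] on a too short list).
def Pre_ngram_freq (n : Int) (_token : List String) : Prop := 1 ≤ n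
instance (n : Int) (token : List String) : Decidable (Pre_ngram_freq n token) := by unfold Pre_ngram_freq; infer_instance
def pvWitness_ngram_freq : Int × List String := (2, ["a", "b", "a", "b"])

def Spec_ngram_freq (n : Int) (token : List String) (out : List (List String × List (String × Int))) : Prop := out = ngram_freq_alt n token
instance (n : Int) (token : List String) (out : List (List String × List (String × Int))) : Decidable (Spec_ngram_freq n token out) := by unfold Spec_ngram_freq; infer_instance

-- ===== CLAIM (what is proved, stated in full; the proofs are below) =====
def Claim_equal_ngram_freq : Prop := ∀ (n : Int) (token : List String), Dom_ngram_freq n token → Pre_ngram_freq n token → Spec_ngram_freq n token (ngram_freq n token)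

-- ===== LEMMAS AND PROOFS =====

-- `tmap` turns B's groups dict into A's dict of counts, value-wise.
def tmap (g : PySem.Dict (List String) (List String)) : PySem.Dict (List String) (PySem.Dict String Int) :=
  PySem.Dict.mk (g.items.map (fun p => (p.1, PySem.Dict.counter p.2)))

theorem tmap_contains (g : PySem.Dict (List String) (List String)) (k : List String) :
    (tmap g).contains k = g.contains k := by
  simp [tmap, PySem.Dict.contains, List.any_map, Function.comp_def]

theorem tmap_get? (g : PySem.Dict (List String) (List String)) (k : List String) :
    (tmap g).get? k = (g.get? k).map PySem.Dict.counter := by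
  simp only [tmap, PySem.Dict.get?, List.find?_map, Function.comp_def]
  cases List.find? (fun p => p.1 == k) g.items <;> rfl

theorem tmap_insert (g : PySem.Dict (List String) (List String)) (k : List String) (v : List String) :
    tmap (g.insert k v) = (tmap g).insert k (PySem.Dict.counter v) := by
  have hc : (PySem.Dict.mk (List.map (fun p => (p.1, PySem.Dict.counter p.2)) g.items)).contains k
      = g.contains k := tmap_contains g k
  unfold tmap
  simp only [PySem.Dict.insert, hc]
  by_cases h : g.contains k = true
  · simp only [h, if_true, List.map_map]
    congr 1
    apply List.map_congr_left
    intro p _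
    by_cases hp : p.1 = k <;> simp [hp]
  · simp only [h, if_false, Bool.false_eq_true, List.map_append, List.map_cons, List.map_nil]

-- one step: A's inline branching on (tmap g) equals tmap of B's modify-append step
theorem step_comm (g : PySem.Dict (List String) (List String)) (p : List String) (c : String) :
    (if (tmap g).contains p = false then
      (tmap g).insert p (PySem.Dict.empty.insert c 1)
    else
      let inner := (tmap g).getD p PySem.Dict.empty
      if inner.contains c = false then
        (tmap g).insert p (inner.insert c 1)
      else
        (tmap g).insert p (inner.insert c (inner.getD c 0 + 1)))
    = tmap (g.modify p [] (fun cs => cs ++ [c])) := by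
  rw [PySem.Dict.modify, tmap_insert, PySem.Dict.counter_append_singleton, PySem.Dict.modify]
  by_cases h : g.contains p = true
  · obtain ⟨cs, hcs⟩ : ∃ cs, g.get? p = some cs := by
      rcases h' : g.get? p with _ | cs
      · rw [PySem.Dict.get?_eq_none_iff_contains] at h'; simp [h'] at h
      · exact ⟨cs, rfl⟩
    have hg1 : (tmap g).getD p PySem.Dict.empty = PySem.Dict.counter cs := by
      simp [PySem.Dict.getD, tmap_get?, hcs]
    have hg2 : g.getD p [] = cs := by simp [PySem.Dict.getD, hcs]
    have hcf : (tmap g).contains p = true := by rw [tmap_contains]; exact h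
    rw [if_neg (by simp [hcf]), hg1, hg2]
    by_cases hc : (PySem.Dict.counter cs).contains c = true
    · rw [if_neg (by simp [hc])]
    · simp only [Bool.not_eq_true] at hc
      rw [if_pos hc, PySem.Dict.getD_of_not_contains _ _ hc]
      norm_num
  · simp only [Bool.not_eq_true] at h
    have hcf : (tmap g).contains p = false := by rw [tmap_contains]; exact h
    rw [if_pos hcf, PySem.Dict.getD_of_not_contains _ _ h]
    congr 1

-- the folds commute with tmap over any list of (prefix, continuation) pairs
theorem fold_comm (ps : List (List String × String)) (g : PySem.Dict (List String) (List String)) :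
    ps.foldl (fun fd pc =>
        if fd.contains pc.1 = false then
          fd.insert pc.1 (PySem.Dict.empty.insert pc.2 1)
        else
          let inner := fd.getD pc.1 PySem.Dict.empty
          if inner.contains pc.2 = false then
            fd.insert pc.1 (inner.insert pc.2 1)
          else
            fd.insert pc.1 (inner.insert pc.2 (inner.getD pc.2 0 + 1)))
      (tmap g)
    = tmap (ps.foldl (fun g pc => g.modify pc.1 [] (fun cs => cs ++ [pc.2])) g) := by
  induction ps generalizing g with
  | nil => rfl
  | cons pc ps ih => simp only [List.foldl_cons, step_comm g pc.1 pc.2]; exact ih _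

-- the word A extracts at index i is the contiguous slice token[i:i+n]
theorem word_eq (n : Int) (token : List String) (i : Int) (hn : 1 ≤ n)
    (h0 : 0 ≤ i) (h1 : i + n ≤ (token.length : Int)) :
    (PySem.List.pyRange 0 n 1).map (fun j => PySem.List.pyGetD token (i + j) "")
      = (token.drop i.toNat).take n.toNat := by
  rw [PySem.List.pyRange_one, List.map_map]
  apply List.ext_getElem
  · simp; omega
  · intro k hk1 hk2
    simp only [List.getElem_map, List.getElem_range, Function.comp_apply, zero_add,
      List.getElem_take, List.getElem_drop]
    rw [PySem.List.pyGetD_eq_getElem token "" (by omega)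
      (by simp at hk1 ⊢; omega)]
    congr 1
    simp at hk1; omega

theorem ngram_freq_spec : Claim_equal_ngram_freq := by
  intro n token _ hn
  unfold Spec_ngram_freq ngram_freq ngram_freq_alt
  simp only []
  rw [List.foldl_map]
  rw [show (PySem.Dict.empty : PySem.Dict (List String) (PySem.Dict String Int)) = tmap PySem.Dict.empty from rfl]
  rw [PySem.List.foldl_congr_mem _ _
    (fun fd i =>
      if fd.contains (PySem.List.slice token (some i) (some (i + n - 1))) = false then
        fd.insert (PySem.List.slice token (some i) (some (i + n - 1)))
          (PySem.Dict.empty.insert (PySem.List.pyGetD token (i + n - 1) "") 1)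
      else
        let inner := fd.getD (PySem.List.slice token (some i) (some (i + n - 1))) PySem.Dict.empty
        if inner.contains (PySem.List.pyGetD token (i + n - 1) "") = false then
          fd.insert (PySem.List.slice token (some i) (some (i + n - 1)))
            (inner.insert (PySem.List.pyGetD token (i + n - 1) "") 1)
        else
          fd.insert (PySem.List.slice token (some i) (some (i + n - 1)))
            (inner.insert (PySem.List.pyGetD token (i + n - 1) "")
              (inner.getD (PySem.List.pyGetD token (i + n - 1) "") 0 + 1))) _ ?_]
  · have := fold_comm ((PySem.List.pyRange 0 ((token.length : Int) - n + 1) 1).map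
      (fun i => (PySem.List.slice token (some i) (some (i + n - 1)),
                 PySem.List.pyGetD token (i + n - 1) ""))) PySem.Dict.empty
    rw [List.foldl_map] at this
    dsimp only at this
    rw [this]
    rw [List.foldl_map]
    simp only [tmap, List.map_map]
    apply List.map_congr_left
    intro pr _
    simp [pvTally, PySem.Dict.foldl_insert_getD_add_one_eq_counter]
  · intro fd i hi
    have hn' : 1 ≤ n := hn
    rw [PySem.List.mem_pyRange_one] at hi
    obtain ⟨hi0, hi1⟩ := hi
    have hword := word_eq n token i hn hi0 (by omega)
    have hpfx : PySem.List.slice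
        ((PySem.List.pyRange 0 n 1).map (fun j => PySem.List.pyGetD token (i + j) ""))
        (some 0) (some (n - 1))
        = PySem.List.slice token (some i) (some (i + n - 1)) := by
      rw [hword, PySem.List.slice_toNat _ hi0 (by omega), PySem.List.slice_toNat _ (by omega) (by omega)]
      simp only [Int.toNat_zero, List.drop_zero, List.take_take]
      rw [show (i + n - 1).toNat - i.toNat = (n - 1).toNat by omega]
      rw [show min ((n - 1).toNat - 0) n.toNat = (n - 1).toNat by omega]
    have hcont : PySem.List.pyGetD
        ((PySem.List.pyRange 0 n 1).map (fun j => PySem.List.pyGetD token (i + j) "")) (n - 1) ""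
        = PySem.List.pyGetD token (i + n - 1) "" := by
      rw [hword]
      rw [PySem.List.pyGetD_eq_getElem _ "" (by omega) (by simp; omega)]
      rw [PySem.List.pyGetD_eq_getElem token "" (by omega) (by omega)]
      simp only [List.getElem_take, List.getElem_drop]
      congr 1; omega
    rw [hpfx, hcont]
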